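-- pv_equiv track=rewrite | github.com/HKU-BAL/ClairS-TO | src/postfilter_variants.py | _group_postfilter_chunk_positions
-- ===== SOURCE A (Python) =====
-- def _group_postfilter_chunk_positions(sorted_positions, flanking, max_sites, max_span):
--     groups = []
--     n = len(sorted_positions)
--     if n == 0:
--         return groups
--     max_sites = max(1, int(max_sites))
--     max_span = max(1, int(max_span))
--     i = 0
--     while i < n:
--         j = i
--         lo = sorted_positions[i] - flanking
--         hi = sorted_positions[i] + flanking
--         while j + 1 < n:
--             nlo = min(lo, sorted_positions[j + 1] - flanking)
--             nhi = max(hi, sorted_positions[j + 1] + flanking)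
--             span = nhi - max(nlo, 1)
--             if (j - i + 2) > max_sites or span > max_span:
--                 break
--             lo, hi = nlo, nhi
--             j += 1
--         batch = sorted_positions[i : j + 1]
--         reg_lo = max(lo, 1)
--         reg_hi = hi + 1
--         groups.append((batch, reg_lo, reg_hi))
--         i = j + 1
--     return groups
-- ===== SOURCE B (Python) =====
-- def _group_postfilter_chunk_positions(sorted_positions, flanking, max_sites, max_span):
--     if not sorted_positions:
--         return []
--     max_sites = max(1, int(max_sites))
--     max_span = max(1, int(max_span))
--     groups = []
--     first = sorted_positions[0]
--     batch, lo, hi = [first], first - flanking, first + flanking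
--     for pos in sorted_positions[1:]:
--         nlo = min(lo, pos - flanking)
--         nhi = max(hi, pos + flanking)
--         if len(batch) + 1 > max_sites or nhi - max(nlo, 1) > max_span:
--             groups.append((batch, max(lo, 1), hi + 1))
--             batch, lo, hi = [pos], pos - flanking, pos + flanking
--         else:
--             batch.append(pos)
--             lo, hi = nlo, nhi
--     groups.append((batch, max(lo, 1), hi + 1))
--     return groups
-- ===== Notes on version B (the rewrite author's own statement) =====
-- stated objective: simpler
-- what changed: Replaces A's nested while-loops over indices (inner j-scan that pre-measures each window, then a slice to extract the batch) by a single for-loop over the list that accumulates the current batch, lo and hi directly and flushes it when adding the next position would exceed max_sites or max_span.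
import Mathlib
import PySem

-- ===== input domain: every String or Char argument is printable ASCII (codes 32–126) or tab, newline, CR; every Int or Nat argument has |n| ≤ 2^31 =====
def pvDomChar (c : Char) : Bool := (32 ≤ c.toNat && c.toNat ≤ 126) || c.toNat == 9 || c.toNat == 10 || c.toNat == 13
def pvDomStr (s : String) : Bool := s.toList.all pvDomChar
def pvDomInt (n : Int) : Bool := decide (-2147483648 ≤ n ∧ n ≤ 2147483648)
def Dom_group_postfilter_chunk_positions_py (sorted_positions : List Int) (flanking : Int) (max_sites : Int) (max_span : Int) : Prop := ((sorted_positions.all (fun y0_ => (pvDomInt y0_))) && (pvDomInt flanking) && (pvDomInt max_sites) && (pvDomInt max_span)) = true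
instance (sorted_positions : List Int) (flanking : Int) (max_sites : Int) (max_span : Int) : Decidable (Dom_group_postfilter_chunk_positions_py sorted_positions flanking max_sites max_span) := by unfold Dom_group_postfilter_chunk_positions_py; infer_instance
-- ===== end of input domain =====

-- B replaces A's nested index-window while-loops (inner j-scan + slice per batch) by a single
-- stream pass that accumulates the current batch directly; objective: simpler (same algorithmic cost).

-- ===== PORT A =====
-- inner 'while j + 1 < n' loop of A; the fuel argument (called with n, an upper bound on the
-- trip count) only makes the recursion structural; xs.getD (j+1) 0 is Python's xs[j+1] (in range here)
def pvInnerA (xs : List Int) (flanking max_sites max_span : Int) (n i : Nat) :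
    Nat → Nat → Int → Int → Nat × Int × Int
  | 0, j, lo, hi => (j, lo, hi)
  | fuel+1, j, lo, hi =>
    if j + 1 < n then
      if ((j : Int) - (i : Int) + 2 > max_sites) ∨
         (max hi (xs.getD (j+1) 0 + flanking) - max (min lo (xs.getD (j+1) 0 - flanking)) 1 > max_span) then
        (j, lo, hi)
      else
        pvInnerA xs flanking max_sites max_span n i fuel (j+1)
          (min lo (xs.getD (j+1) 0 - flanking)) (max hi (xs.getD (j+1) 0 + flanking))
    else (j, lo, hi)

-- outer 'while i < n' loop of A, with the groups accumulator (fuel = n bounds the trip count;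
-- xs.getD i 0 is Python's xs[i], in range since i < n)
def pvOuterA (xs : List Int) (flanking max_sites max_span : Int) (n : Nat) :
    Nat → List (List Int × Int × Int) → Nat → List (List Int × Int × Int)
  | 0, groups, _ => groups
  | fuel+1, groups, i =>
    if i < n then
      pvOuterA xs flanking max_sites max_span n fuel
        (groups ++ [((PySem.List.slice xs (some (i : Int))
            (some (((pvInnerA xs flanking max_sites max_span n i n i
                      (xs.getD i 0 - flanking) (xs.getD i 0 + flanking)).1 : Int) + 1))),
          max (pvInnerA xs flanking max_sites max_span n i n i
                (xs.getD i 0 - flanking) (xs.getD i 0 + flanking)).2.1 1,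
          (pvInnerA xs flanking max_sites max_span n i n i
                (xs.getD i 0 - flanking) (xs.getD i 0 + flanking)).2.2 + 1)])
        ((pvInnerA xs flanking max_sites max_span n i n i
            (xs.getD i 0 - flanking) (xs.getD i 0 + flanking)).1 + 1)
    else groups

def group_postfilter_chunk_positions_py (sorted_positions : List Int) (flanking : Int) (max_sites : Int) (max_span : Int) : List (List Int × Int × Int) :=
  if sorted_positions.length = 0 then []
  else pvOuterA sorted_positions flanking (max 1 max_sites) (max 1 max_span)
    sorted_positions.length sorted_positions.length [] 0

-- ===== PORT B =====
-- B's single for-loop over the remaining positions, carrying (groups, batch, lo, hi)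
def pvAltGo (flanking max_sites max_span : Int) (groups : List (List Int × Int × Int))
    (batch : List Int) (lo hi : Int) : List Int → List (List Int × Int × Int)
  | [] => groups ++ [(batch, max lo 1, hi + 1)]
  | p :: rest =>
    if ((batch.length : Int) + 1 > max_sites) ∨
       (max hi (p + flanking) - max (min lo (p - flanking)) 1 > max_span) then
      pvAltGo flanking max_sites max_span (groups ++ [(batch, max lo 1, hi + 1)])
        [p] (p - flanking) (p + flanking) rest
    else
      pvAltGo flanking max_sites max_span groups (batch ++ [p])
        (min lo (p - flanking)) (max hi (p + flanking)) rest

def group_postfilter_chunk_positions_py_alt (sorted_positions : List Int) (flanking : Int) (max_sites : Int) (max_span : Int) : List (List Int × Int × Int) :=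
  match sorted_positions with
  | [] => []
  | x :: rest =>
    pvAltGo flanking (max 1 max_sites) (max 1 max_span) [] [x] (x - flanking) (x + flanking) rest

-- ===== PRECONDITION & SPEC =====
def Spec_group_postfilter_chunk_positions_py (sorted_positions : List Int) (flanking : Int) (max_sites : Int) (max_span : Int) (out : List (List Int × Int × Int)) : Prop := out = group_postfilter_chunk_positions_py_alt sorted_positions flanking max_sites max_span
instance (sorted_positions : List Int) (flanking : Int) (max_sites : Int) (max_span : Int) (out : List (List Int × Int × Int)) : Decidable (Spec_group_postfilter_chunk_positions_py sorted_positions flanking max_sites max_span out) := by unfold Spec_group_postfilter_chunk_positions_py; infer_instance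

-- ===== CLAIM (what is proved, stated in full; the proofs are below) =====
def Claim_equal_group_postfilter_chunk_positions_py : Prop := ∀ (sorted_positions : List Int) (flanking : Int) (max_sites : Int) (max_span : Int), Dom_group_postfilter_chunk_positions_py sorted_positions flanking max_sites max_span → Spec_group_postfilter_chunk_positions_py sorted_positions flanking max_sites max_span (group_postfilter_chunk_positions_py sorted_positions flanking max_sites max_span)

-- ===== LEMMAS AND PROOFS =====

-- B's loop restarted on a fresh suffix (the shape of its state right after a flush / at the start)
def pvAltRest (flanking max_sites max_span : Int) : List Int → List (List Int × Int × Int)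
  | [] => []
  | y :: r => pvAltGo flanking max_sites max_span [] [y] (y - flanking) (y + flanking) r

-- A's inner loop only moves j forward
theorem pvInnerA_ge (xs : List Int) (flanking max_sites max_span : Int) (n i : Nat) :
    ∀ (fuel j : Nat) (lo hi : Int), j ≤ (pvInnerA xs flanking max_sites max_span n i fuel j lo hi).1 := by
  intro fuel
  induction fuel with
  | zero => intro j lo hi; simp [pvInnerA]
  | succ k ih =>
    intro j lo hi
    simp only [pvInnerA]
    split_ifs with h1 h2
    · simp
    · have := ih (j+1) (min lo (xs.getD (j+1) 0 - flanking)) (max hi (xs.getD (j+1) 0 + flanking))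
      omega
    · simp

theorem pvAltGo_acc (flanking max_sites max_span : Int) :
    ∀ (rest : List Int) (groups : List (List Int × Int × Int)) (batch : List Int) (lo hi : Int),
      pvAltGo flanking max_sites max_span groups batch lo hi rest =
      groups ++ pvAltGo flanking max_sites max_span [] batch lo hi rest := by
  intro rest
  induction rest with
  | nil => intro groups batch lo hi; simp [pvAltGo]
  | cons p r ih =>
    intro groups batch lo hi
    simp only [pvAltGo]
    split_ifs with hc
    · rw [ih (groups ++ [(batch, max lo 1, hi + 1)]), ih ([] ++ [(batch, max lo 1, hi + 1)])]
      simp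
    · exact ih groups (batch ++ [p]) (min lo (p - flanking)) (max hi (p + flanking))

-- B's loop, run on the batch A's inner loop has collected so far, simulates that inner loop
theorem pvInner_sim (xs : List Int) (flanking max_sites max_span : Int) (i : Nat) :
    ∀ (fuel j : Nat) (lo hi : Int), xs.length - j ≤ fuel → i ≤ j → j < xs.length →
      pvAltGo flanking max_sites max_span [] ((xs.drop i).take (j + 1 - i)) lo hi (xs.drop (j + 1)) =
      ((xs.drop i).take ((pvInnerA xs flanking max_sites max_span xs.length i fuel j lo hi).1 + 1 - i),
        max (pvInnerA xs flanking max_sites max_span xs.length i fuel j lo hi).2.1 1,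
        (pvInnerA xs flanking max_sites max_span xs.length i fuel j lo hi).2.2 + 1) ::
      pvAltRest flanking max_sites max_span
        (xs.drop ((pvInnerA xs flanking max_sites max_span xs.length i fuel j lo hi).1 + 1)) := by
  intro fuel
  induction fuel with
  | zero => intro j lo hi hk hij hj; omega
  | succ k ih =>
    intro j lo hi hk hij hj
    by_cases h : j + 1 < xs.length
    · have hg : xs.getD (j+1) 0 = xs[j+1] := List.getD_eq_getElem xs 0 h
      have hdrop : xs.drop (j+1) = xs[j+1] :: xs.drop (j+1+1) := List.drop_eq_getElem_cons h
      have hlen : ((((xs.drop i).take (j + 1 - i)).length : Int) + 1 > max_sites) =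
          ((j : Int) - (i : Int) + 2 > max_sites) := by
        have hl : ((xs.drop i).take (j + 1 - i)).length = j + 1 - i := by
          simp only [List.length_take, List.length_drop]; omega
        rw [hl]
        congr 1
        omega
      simp only [pvInnerA]
      rw [if_pos h, hg, hdrop]
      simp only [pvAltGo, hlen]
      by_cases hc : ((j : Int) - (i : Int) + 2 > max_sites) ∨
          (max hi (xs[j+1] + flanking) - max (min lo (xs[j+1] - flanking)) 1 > max_span)
      · rw [if_pos hc, if_pos hc]
        rw [pvAltGo_acc]
        conv_rhs => rw [hdrop]
        simp only [pvAltRest]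
        simp
      · rw [if_neg hc, if_neg hc]
        have hbatch : (xs.drop i).take (j + 1 - i) ++ [xs[j+1]] = (xs.drop i).take (j + 1 + 1 - i) := by
          have hm : j + 1 + 1 - i = (j + 1 - i) + 1 := by omega
          rw [hm, List.take_add_one]
          have hq : (xs.drop i)[j+1-i]? = some xs[j+1] := by
            rw [List.getElem?_drop]
            rw [show i + (j + 1 - i) = j + 1 from by omega, List.getElem?_eq_getElem h]
          rw [hq]
          rfl
        rw [hbatch]
        exact ih (j+1) (min lo (xs[j+1] - flanking)) (max hi (xs[j+1] + flanking))
          (by omega) (by omega) h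
    · simp only [pvInnerA]
      rw [if_neg h]
      rw [List.drop_eq_nil_of_le (show xs.length ≤ j + 1 by omega)]
      simp [pvAltGo, pvAltRest]

-- B's loop restarted at a suffix simulates A's outer loop
theorem pvOuter_sim (xs : List Int) (flanking max_sites max_span : Int) :
    ∀ (fuel i : Nat) (groups : List (List Int × Int × Int)), xs.length - i ≤ fuel →
      pvOuterA xs flanking max_sites max_span xs.length fuel groups i =
      groups ++ pvAltRest flanking max_sites max_span (xs.drop i) := by
  intro fuel
  induction fuel with
  | zero =>
    intro i groups h
    simp only [pvOuterA]
    rw [List.drop_eq_nil_of_le (show xs.length ≤ i by omega)]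
    simp [pvAltRest]
  | succ k ih =>
    intro i groups h
    by_cases hi : i < xs.length
    · have hg : xs.getD i 0 = xs[i] := List.getD_eq_getElem xs 0 hi
      have hdrop : xs.drop i = xs[i] :: xs.drop (i+1) := List.drop_eq_getElem_cons hi
      have hge := pvInnerA_ge xs flanking max_sites max_span xs.length i xs.length i
        (xs[i] - flanking) (xs[i] + flanking)
      simp only [pvOuterA]
      rw [if_pos hi, hg]
      rw [ih _ _ (by omega)]
      conv_rhs => rw [hdrop]
      rw [show pvAltRest flanking max_sites max_span (xs[i] :: xs.drop (i+1)) =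
        pvAltGo flanking max_sites max_span [] [xs[i]] (xs[i] - flanking) (xs[i] + flanking)
          (xs.drop (i+1)) from rfl]
      have hb1 : [xs[i]] = (xs.drop i).take (i + 1 - i) := by
        rw [hdrop, show i + 1 - i = 1 from by omega]
        rfl
      conv_rhs => rw [hb1]
      rw [pvInner_sim xs flanking max_sites max_span i xs.length i
        (xs[i] - flanking) (xs[i] + flanking) (by omega) (Nat.le_refl i) hi]
      have hcast : ((pvInnerA xs flanking max_sites max_span xs.length i xs.length i
            (xs[i] - flanking) (xs[i] + flanking)).1 : Int) + 1 =
          (((pvInnerA xs flanking max_sites max_span xs.length i xs.length i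
            (xs[i] - flanking) (xs[i] + flanking)).1 + 1 : Nat) : Int) := by
        push_cast; ring
      rw [hcast, PySem.List.slice_natCast]
      simp
    · simp only [pvOuterA]
      rw [if_neg hi]
      rw [List.drop_eq_nil_of_le (show xs.length ≤ i by omega)]
      simp [pvAltRest]

-- ===== VERDICT (by name: the statement is the Claim_ definition above) =====
theorem group_postfilter_chunk_positions_py_spec : Claim_equal_group_postfilter_chunk_positions_py := by
  intro xs f ms msp _
  unfold Spec_group_postfilter_chunk_positions_py
  unfold group_postfilter_chunk_positions_py group_postfilter_chunk_positions_py_alt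
  cases xs with
  | nil => rfl
  | cons x rest =>
    rw [if_neg (by simp)]
    rw [pvOuter_sim (x :: rest) f (max 1 ms) (max 1 msp) (x :: rest).length 0 [] (by omega)]
    simp [pvAltRest]
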